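-- pv_equiv track=rewrite | github.com/esitarski/CrossMgr | CrossMgrVideo/MainWin.py | filterLastBibWave
-- ===== SOURCE A (Python) =====
-- def filterLastBibWave( infoList):
-- 	''' Filter out all photos but the last by bib and wave. '''
-- 	seen = set()
-- 	infoListNew = []
-- 	for info in reversed(infoList):
-- 		key = (info['bib'], info['wave'])
-- 		if key not in seen:
-- 			seen.add( key )
-- 			infoListNew.append( info )
-- 	infoListNew.reverse()
-- 	return infoListNew
-- ===== SOURCE B (Python) =====
-- def filterLastBibWave(infoList):
-- 	''' Filter out all photos but the last by bib and wave. '''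
-- 	def key(info):
-- 		return (info['bib'], info['wave'])
-- 	return [info for i, info in enumerate(infoList)
-- 	        if all(key(later) != key(info) for later in infoList[i + 1:])]
-- ===== Notes on version B (the rewrite author's own statement) =====
-- stated objective: alternative
-- what changed: Replaces A's reversed pass with a seen-set plus final reverse by a forward lookahead filter: keep an item iff no later item shares its (bib, wave) key.
import Mathlib
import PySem

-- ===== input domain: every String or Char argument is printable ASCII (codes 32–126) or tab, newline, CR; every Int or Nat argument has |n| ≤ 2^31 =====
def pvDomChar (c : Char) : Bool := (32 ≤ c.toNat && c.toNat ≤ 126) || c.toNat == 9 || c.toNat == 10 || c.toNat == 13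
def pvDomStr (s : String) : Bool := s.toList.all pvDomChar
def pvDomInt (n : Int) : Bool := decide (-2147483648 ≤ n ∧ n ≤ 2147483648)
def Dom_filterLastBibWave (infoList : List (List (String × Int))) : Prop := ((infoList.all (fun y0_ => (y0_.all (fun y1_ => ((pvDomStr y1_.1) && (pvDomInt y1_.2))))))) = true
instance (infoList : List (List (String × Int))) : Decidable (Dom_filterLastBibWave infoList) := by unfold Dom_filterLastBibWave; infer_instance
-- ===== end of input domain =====

-- B replaces A's reversed pass with a seen-set and final reverse by a forward lookahead
-- filter: keep an item iff no later item shares its (bib, wave) key. Objective: alternative.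

-- key = (info['bib'], info['wave']); exact under Pre_ (both keys present), where getD's
-- defaults are never used.
def pvKey (info : List (String × Int)) : Int × Int :=
  ((PySem.Dict.mk info).getD "bib" 0, (PySem.Dict.mk info).getD "wave" 0)

-- ===== PORT A =====
-- loop body of A: 'if key not in seen: seen.add(key); infoListNew.append(info)'
def pvStepA (st : PySem.Set (Int × Int) × List (List (String × Int)))
    (info : List (String × Int)) : PySem.Set (Int × Int) × List (List (String × Int)) :=
  let key := pvKey info
  if PySem.Set.contains st.1 key then st
  else (PySem.Set.add st.1 key, st.2 ++ [info])

def filterLastBibWave (infoList : List (List (String × Int))) : List (List (String × Int)) :=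
  let r := infoList.reverse.foldl pvStepA (PySem.Set.empty, [])
  r.2.reverse

-- ===== PORT B =====
-- B's comprehension: item at position i is kept iff all laters (the suffix infoList[i+1:])
-- have a different key; transcribed as structural recursion, the tail being that suffix.
def filterLastBibWave_alt (infoList : List (List (String × Int))) : List (List (String × Int)) :=
  match infoList with
  | [] => []
  | info :: rest =>
      if rest.all (fun later => !(pvKey later == pvKey info)) then
        info :: filterLastBibWave_alt rest
      else
        filterLastBibWave_alt rest

-- ===== PRECONDITION & SPEC =====
-- Pre_ excludes exactly the inputs where Python A raises KeyError: some info lacks 'bib' or 'wave'.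
def Pre_filterLastBibWave (infoList : List (List (String × Int))) : Prop :=
  ∀ info ∈ infoList, (PySem.Dict.mk info).contains "bib" = true ∧ (PySem.Dict.mk info).contains "wave" = true
instance (infoList : List (List (String × Int))) : Decidable (Pre_filterLastBibWave infoList) := by unfold Pre_filterLastBibWave; infer_instance
def pvWitness_filterLastBibWave : (List (List (String × Int))) := ([[("bib", 5), ("wave", 1)], [("bib", 5), ("wave", 1)]])

def Spec_filterLastBibWave (infoList : List (List (String × Int))) (out : List (List (String × Int))) : Prop := out = filterLastBibWave_alt infoList
instance (infoList : List (List (String × Int))) (out : List (List (String × Int))) : Decidable (Spec_filterLastBibWave infoList out) := by unfold Spec_filterLastBibWave; infer_instance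

-- ===== CLAIM (what is proved, stated in full; the proofs are below) =====
def Claim_equal_filterLastBibWave : Prop := ∀ (infoList : List (List (String × Int))), Dom_filterLastBibWave infoList → Pre_filterLastBibWave infoList → Spec_filterLastBibWave infoList (filterLastBibWave infoList)

-- ===== LEMMAS AND PROOFS =====

lemma pvA_seen (l : List (List (String × Int))) :
    ∀ (st : PySem.Set (Int × Int) × List (List (String × Int))) (k : Int × Int),
      PySem.Set.contains (l.foldl pvStepA st).1 k =
        (PySem.Set.contains st.1 k || l.any (fun y => pvKey y == k)) := by
  induction l with
  | nil => intro st k; simp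
  | cons x t ih =>
    intro st k
    simp only [List.foldl_cons, List.any_cons, pvStepA]
    by_cases h : PySem.Set.contains st.1 (pvKey x) = true
    · simp only [h, if_true, ih]
      by_cases hk : pvKey x = k
      · subst hk
        simp [PySem.Set.contains] at h ⊢
        simp [h]
      · have : (pvKey x == k) = false := by simp [hk]
        simp [this]
    · simp only [h, ih]
      by_cases hk : pvKey x = k
      · subst hk; simp
      · have h1 : (pvKey x == k) = false := by simp [hk]
        have h2 : ¬ k = pvKey x := fun e => hk e.symm
        simp [h1, h2]

lemma pvA_fold_rev (t : List (List (String × Int))) :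
    (t.reverse.foldl pvStepA (PySem.Set.empty, [])).2 = (filterLastBibWave_alt t).reverse := by
  induction t with
  | nil => simp [filterLastBibWave_alt]
  | cons x r ih =>
    have hrev : (x :: r).reverse = r.reverse ++ [x] := by simp
    rw [hrev, List.foldl_append]
    simp only [List.foldl_cons, List.foldl_nil, pvStepA]
    rw [pvA_seen]
    have hc : (PySem.Set.contains (PySem.Set.empty : PySem.Set (Int × Int)) (pvKey x) ||
        r.reverse.any (fun y => pvKey y == pvKey x)) = r.any (fun y => pvKey y == pvKey x) := by
      simp [PySem.Set.empty, PySem.Set.contains]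
    rw [hc]
    simp only [filterLastBibWave_alt]
    by_cases h : r.any (fun y => pvKey y == pvKey x) = true
    · have hall : r.all (fun later => !(pvKey later == pvKey x)) = false := by
        obtain ⟨y, hy, hby⟩ := List.any_eq_true.mp h
        exact List.all_eq_false.mpr ⟨y, hy, by simp [hby]⟩
      rw [if_pos h, hall, if_neg (by simp)]
      exact ih
    · have hall : r.all (fun later => !(pvKey later == pvKey x)) = true := by
        simp only [List.all_eq_true]
        intro y hy
        cases hby : (pvKey y == pvKey x) with
        | false => rfl
        | true => exact absurd (List.any_eq_true.2 ⟨y, hy, hby⟩) h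
      rw [if_neg h, hall, if_pos rfl, List.reverse_cons, ← ih]

-- ===== VERDICT (by name: the statement is the Claim_ definition above) =====
theorem filterLastBibWave_spec : Claim_equal_filterLastBibWave := by
  intro infoList _ _
  unfold Spec_filterLastBibWave
  show (infoList.reverse.foldl pvStepA (PySem.Set.empty, [])).2.reverse = _
  rw [pvA_fold_rev, List.reverse_reverse]
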